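-- pv_equiv track=rewrite | github.com/GaniKore2022/SUMMER_TRAINING_PYTHON | recursion_2.py | evens_odds
-- ===== SOURCE A (Python) =====
-- def evens_odds(lst1,lst2,e,o,i):
--     if i==len(lst1):
--         return e,o
--     if lst1[i]%2==0:
--         e.append(lst1[i])
--     if lst2[i]%2!=0:
--         o.append(lst2[i])
--     return evens_odds(lst1,lst2,e,o,i+1)
-- ===== SOURCE B (Python) =====
-- def evens_odds(lst1, lst2, e, o, i):
--     # Iterative loop instead of index recursion; mutates e and o in place like A.
--     for j in range(i, len(lst1)):
--         if lst1[j] % 2 == 0: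
--             e.append(lst1[j])
--         if lst2[j] % 2 != 0:
--             o.append(lst2[j])
--     return e, o
-- ===== Notes on version B (the rewrite author's own statement) =====
-- stated objective: idiomatic
-- what changed: Replaces the tail recursion over an index with a single iterative for-loop over range(i, len(lst1)).
import Mathlib
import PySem

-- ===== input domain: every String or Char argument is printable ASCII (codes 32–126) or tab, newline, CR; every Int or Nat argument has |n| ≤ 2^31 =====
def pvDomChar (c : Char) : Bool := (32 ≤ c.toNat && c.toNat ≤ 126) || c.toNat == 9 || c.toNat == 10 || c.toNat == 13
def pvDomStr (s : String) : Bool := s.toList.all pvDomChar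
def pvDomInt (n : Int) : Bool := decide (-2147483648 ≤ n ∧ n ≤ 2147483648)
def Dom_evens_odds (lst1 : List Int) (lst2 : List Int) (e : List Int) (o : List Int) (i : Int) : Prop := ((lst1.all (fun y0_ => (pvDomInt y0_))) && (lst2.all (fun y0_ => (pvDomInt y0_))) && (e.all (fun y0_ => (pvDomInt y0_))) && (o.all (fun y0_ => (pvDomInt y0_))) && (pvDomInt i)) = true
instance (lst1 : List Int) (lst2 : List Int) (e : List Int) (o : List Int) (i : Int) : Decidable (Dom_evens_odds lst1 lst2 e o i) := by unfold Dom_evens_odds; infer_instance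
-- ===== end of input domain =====

-- B replaces A's index recursion with one iterative loop over range(i, len(lst1)) (idiomatic; return value identical on Pre_; both mutate e/o in Python, equivalence here is about the return value, which is the same pair).

-- ===== PORT A =====
-- fuel = remaining steps + 1; the 0 case is unreachable on Pre_ (A raises IndexError there)
def evensOddsGoA (lst1 lst2 : List Int) : Nat → List Int → List Int → Int → List Int × List Int
  | 0, e, o, _ => (e, o)
  | fuel + 1, e, o, i =>
    if i = (lst1.length : Int) then (e, o)
    else
      let e' := if PySem.Int.mod (PySem.List.pyGetD lst1 i 0) 2 = 0 then e ++ [PySem.List.pyGetD lst1 i 0] else e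
      let o' := if PySem.Int.mod (PySem.List.pyGetD lst2 i 0) 2 ≠ 0 then o ++ [PySem.List.pyGetD lst2 i 0] else o
      evensOddsGoA lst1 lst2 fuel e' o' (i + 1)

def evens_odds (lst1 : List Int) (lst2 : List Int) (e : List Int) (o : List Int) (i : Int) : List Int × List Int :=
  evensOddsGoA lst1 lst2 (((lst1.length : Int) - i).toNat + 1) e o i

-- ===== PORT B =====
def evens_odds_alt (lst1 : List Int) (lst2 : List Int) (e : List Int) (o : List Int) (i : Int) : List Int × List Int :=
  (PySem.List.pyRange i lst1.length 1).foldl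
    (fun p j =>
      let p1 := if PySem.Int.mod (PySem.List.pyGetD lst1 j 0) 2 = 0 then (p.1 ++ [PySem.List.pyGetD lst1 j 0], p.2) else p
      if PySem.Int.mod (PySem.List.pyGetD lst2 j 0) 2 ≠ 0 then (p1.1, p1.2 ++ [PySem.List.pyGetD lst2 j 0]) else p1)
    (e, o)

-- ===== PRECONDITION & SPEC =====
-- Pre_ is exactly where A returns: i ≤ len(lst1); and when the loop body runs (i < len),
-- every index i..len(lst1)-1 must be valid for lst1 (−len1 ≤ i) and for lst2 (len2 ≥ len1).
def Pre_evens_odds (lst1 : List Int) (lst2 : List Int) (e : List Int) (o : List Int) (i : Int) : Prop :=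
  i ≤ (lst1.length : Int) ∧ (i < (lst1.length : Int) → ((lst1.length : Int) ≤ (lst2.length : Int) ∧ -(lst1.length : Int) ≤ i))
instance (lst1 : List Int) (lst2 : List Int) (e : List Int) (o : List Int) (i : Int) : Decidable (Pre_evens_odds lst1 lst2 e o i) := by unfold Pre_evens_odds; infer_instance
def pvWitness_evens_odds : List Int × List Int × List Int × List Int × Int := ([2, 3], [1, 2], [], [], 0)

def Spec_evens_odds (lst1 : List Int) (lst2 : List Int) (e : List Int) (o : List Int) (i : Int) (out : List Int × List Int) : Prop := out = evens_odds_alt lst1 lst2 e o i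
instance (lst1 : List Int) (lst2 : List Int) (e : List Int) (o : List Int) (i : Int) (out : List Int × List Int) : Decidable (Spec_evens_odds lst1 lst2 e o i out) := by unfold Spec_evens_odds; infer_instance

-- ===== CLAIM (what is proved, stated in full; the proofs are below) =====
def Claim_equal_evens_odds : Prop := ∀ (lst1 : List Int) (lst2 : List Int) (e : List Int) (o : List Int) (i : Int), Dom_evens_odds lst1 lst2 e o i → Pre_evens_odds lst1 lst2 e o i → Spec_evens_odds lst1 lst2 e o i (evens_odds lst1 lst2 e o i)

-- ===== LEMMAS AND PROOFS =====

-- A's fuel recursion equals B's fold over the remaining range, for any sufficient fuel.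
theorem evensOddsGoA_eq_foldl (lst1 lst2 : List Int) (fuel : Nat) :
    ∀ (e o : List Int) (i : Int), i ≤ (lst1.length : Int) → (lst1.length : Int) - i ≤ (fuel : Int) →
      evensOddsGoA lst1 lst2 fuel e o i =
        (PySem.List.pyRange i lst1.length 1).foldl
          (fun p j =>
            let p1 := if PySem.Int.mod (PySem.List.pyGetD lst1 j 0) 2 = 0 then (p.1 ++ [PySem.List.pyGetD lst1 j 0], p.2) else p
            if PySem.Int.mod (PySem.List.pyGetD lst2 j 0) 2 ≠ 0 then (p1.1, p1.2 ++ [PySem.List.pyGetD lst2 j 0]) else p1)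
          (e, o) := by
  induction fuel with
  | zero =>
    intro e o i hle hf
    have : i = (lst1.length : Int) := by omega
    subst this
    simp [evensOddsGoA, PySem.List.pyRange_one_eq_nil (le_refl _)]
  | succ fuel ih =>
    intro e o i hle hf
    by_cases h : i = (lst1.length : Int)
    · subst h
      simp [evensOddsGoA, PySem.List.pyRange_one_eq_nil (le_refl _)]
    · have hlt : i < (lst1.length : Int) := lt_of_le_of_ne hle h
      rw [PySem.List.pyRange_one_cons hlt]
      simp only [evensOddsGoA, if_neg h, List.foldl_cons]
      rw [ih _ _ (i + 1) (by omega) (by push_cast at hf ⊢; omega)]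
      split_ifs <;> simp_all

-- ===== VERDICT (by name: the statement is the Claim_ definition above) =====
theorem evens_odds_spec : Claim_equal_evens_odds := by
  intro lst1 lst2 e o i _ hpre
  unfold Spec_evens_odds evens_odds evens_odds_alt
  exact evensOddsGoA_eq_foldl lst1 lst2 _ e o i hpre.1 (by omega)
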